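-- pv_equiv track=rewrite | github.com/KayleighJoy/DIRISA_Datathon | classifiers/ReadIn_Data.py | calcCounts
-- ===== SOURCE A (Python) =====
-- def calcCounts(array):
--     countWC = []
--     countDisable =0
--     countEmploy = 0
--     countGender = 0
--     countPhone=0
--     countHos=0
--     for person in array:
--         if person[1] == '1':
--             countDisable += 1
--         if person[2] == '0':
--             countEmploy += 1
--         if person[4] == '1':
--             countGender += 1
--         if person[len(person) - 2] == '1':
--             countPhone += 1
--         if person[len(person)-1] == '1':
--             countHos += 1
--     countWC.append(countDisable)
--     countWC.append(countEmploy)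
--     countWC.append(countGender)
--     countWC.append(countPhone)
--     countWC.append(countHos)
--     return countWC
-- ===== SOURCE B (Python) =====
-- def calcCounts(array):
--     return [
--         sum(1 for p in array if p[1] == '1'),
--         sum(1 for p in array if p[2] == '0'),
--         sum(1 for p in array if p[4] == '1'),
--         sum(1 for p in array if p[-2] == '1'),
--         sum(1 for p in array if p[-1] == '1'),
--     ]
-- ===== Notes on version B (the rewrite author's own statement) =====
-- stated objective: simpler
-- what changed: Replaces A's single fused loop over five mutable accumulators by five independent one-condition scans, one per count, returned directly as a list.
import Mathlib
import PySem

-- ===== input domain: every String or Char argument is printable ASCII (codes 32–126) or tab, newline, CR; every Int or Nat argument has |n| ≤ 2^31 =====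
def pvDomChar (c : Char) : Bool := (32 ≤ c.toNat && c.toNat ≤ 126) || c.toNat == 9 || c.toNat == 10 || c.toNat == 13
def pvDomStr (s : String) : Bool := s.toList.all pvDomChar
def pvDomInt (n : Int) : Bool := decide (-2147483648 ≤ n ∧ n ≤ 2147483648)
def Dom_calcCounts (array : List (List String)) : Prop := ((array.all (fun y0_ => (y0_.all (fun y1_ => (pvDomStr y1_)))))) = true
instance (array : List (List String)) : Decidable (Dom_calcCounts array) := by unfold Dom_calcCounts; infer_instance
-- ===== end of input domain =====

-- B replaces A's single fused five-accumulator loop with five independent one-condition scans.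
-- ===== PORT A =====
-- the body of A's for-loop, one step over the five accumulators
def pvStep (acc : Int × Int × Int × Int × Int) (person : List String) :
    Int × Int × Int × Int × Int :=
  let acc := if PySem.List.pyGetD person 1 "" == "1" then
    (acc.1 + 1, acc.2.1, acc.2.2.1, acc.2.2.2.1, acc.2.2.2.2) else acc
  let acc := if PySem.List.pyGetD person 2 "" == "0" then
    (acc.1, acc.2.1 + 1, acc.2.2.1, acc.2.2.2.1, acc.2.2.2.2) else acc
  let acc := if PySem.List.pyGetD person 4 "" == "1" then
    (acc.1, acc.2.1, acc.2.2.1 + 1, acc.2.2.2.1, acc.2.2.2.2) else acc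
  let acc := if PySem.List.pyGetD person ((person.length : Int) - 2) "" == "1" then
    (acc.1, acc.2.1, acc.2.2.1, acc.2.2.2.1 + 1, acc.2.2.2.2) else acc
  let acc := if PySem.List.pyGetD person ((person.length : Int) - 1) "" == "1" then
    (acc.1, acc.2.1, acc.2.2.1, acc.2.2.2.1, acc.2.2.2.2 + 1) else acc
  acc

def calcCounts (array : List (List String)) : List Int :=
  let r := array.foldl pvStep (0, 0, 0, 0, 0)
  [r.1, r.2.1, r.2.2.1, r.2.2.2.1, r.2.2.2.2]

-- ===== PORT B =====
def calcCounts_alt (array : List (List String)) : List Int :=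
  [ (array.countP (fun p => PySem.List.pyGetD p 1 "" == "1") : Int),
    (array.countP (fun p => PySem.List.pyGetD p 2 "" == "0") : Int),
    (array.countP (fun p => PySem.List.pyGetD p 4 "" == "1") : Int),
    (array.countP (fun p => PySem.List.pyGetD p (-2) "" == "1") : Int),
    (array.countP (fun p => PySem.List.pyGetD p (-1) "" == "1") : Int) ]

-- ===== PRECONDITION & SPEC =====
-- Pre_ excludes exactly the inputs where A raises IndexError: any person row shorter than 5 fields.
def Pre_calcCounts (array : List (List String)) : Prop :=
  ∀ p ∈ array, 5 ≤ p.length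
instance (array : List (List String)) : Decidable (Pre_calcCounts array) := by
  unfold Pre_calcCounts; infer_instance
def pvWitness_calcCounts : List (List String) := [["x", "1", "0", "y", "1", "1", "0"]]
def Spec_calcCounts (array : List (List String)) (out : List Int) : Prop := out = calcCounts_alt array
instance (array : List (List String)) (out : List Int) : Decidable (Spec_calcCounts array out) := by unfold Spec_calcCounts; infer_instance

-- ===== CLAIM (what is proved, stated in full; the proofs are below) =====
def Claim_equal_calcCounts : Prop := ∀ (array : List (List String)), Dom_calcCounts array → Pre_calcCounts array → Spec_calcCounts array (calcCounts array)

-- ===== LEMMAS AND PROOFS =====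
theorem pvStep_eq (a b c d e : Int) (p : List String) :
    pvStep (a, b, c, d, e) p =
      (a + (if PySem.List.pyGetD p 1 "" == "1" then 1 else 0),
       b + (if PySem.List.pyGetD p 2 "" == "0" then 1 else 0),
       c + (if PySem.List.pyGetD p 4 "" == "1" then 1 else 0),
       d + (if PySem.List.pyGetD p ((p.length : Int) - 2) "" == "1" then 1 else 0),
       e + (if PySem.List.pyGetD p ((p.length : Int) - 1) "" == "1" then 1 else 0)) := by
  unfold pvStep
  split_ifs <;> simp

-- Invariant of A's fused fold: each tuple component is its accumulator plus the matching countP.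
theorem calcCounts_foldl_eq (l : List (List String)) :
    ∀ (a b c d e : Int),
    l.foldl pvStep (a, b, c, d, e)
    = (a + (l.countP (fun p => PySem.List.pyGetD p 1 "" == "1") : Int),
       b + (l.countP (fun p => PySem.List.pyGetD p 2 "" == "0") : Int),
       c + (l.countP (fun p => PySem.List.pyGetD p 4 "" == "1") : Int),
       d + (l.countP (fun p => PySem.List.pyGetD p ((p.length : Int) - 2) "" == "1") : Int),
       e + (l.countP (fun p => PySem.List.pyGetD p ((p.length : Int) - 1) "" == "1") : Int)) := by
  induction l with
  | nil => simp
  | cons p l ih =>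
    intro a b c d e
    rw [List.foldl_cons, pvStep_eq, ih]
    simp only [List.countP_cons, Prod.mk.injEq]
    refine ⟨?_, ?_, ?_, ?_, ?_⟩ <;> split_ifs <;> push_cast <;> omega

-- ===== VERDICT (by name: the statement is the Claim_ definition above) =====
theorem calcCounts_spec : Claim_equal_calcCounts := by
  intro array _
  unfold Pre_calcCounts Spec_calcCounts calcCounts calcCounts_alt
  intro hpre
  rw [calcCounts_foldl_eq]
  simp only [List.cons.injEq, and_true, Int.ofNat_inj, zero_add]
  refine ⟨trivial, trivial, trivial, ?_, ?_⟩
  · refine congrArg Nat.cast (List.countP_congr (fun p hp => ?_))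
    have h5 := hpre p hp
    rw [PySem.List.pyGetD_neg_ofNat p 2 "" (by omega) (by omega),
        PySem.List.pyGetD_eq_getElem p (i := ((p.length : Int) - 2)) "" (by omega) (by omega)]
    simp only [show ((p.length : Int) - 2).toNat = p.length - 2 from by omega]
  · refine congrArg Nat.cast (List.countP_congr (fun p hp => ?_))
    have h5 := hpre p hp
    rw [PySem.List.pyGetD_neg_ofNat p 1 "" (by omega) (by omega),
        PySem.List.pyGetD_eq_getElem p (i := ((p.length : Int) - 1)) "" (by omega) (by omega)]
    simp only [show ((p.length : Int) - 1).toNat = p.length - 1 from by omega]
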